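-- pv_equiv track=rewrite | github.com/SilentFox0x/Projects | CodeMark/distill_knowledge/tutil.py | get_variable_posistions_from_code
-- ===== SOURCE A (Python) =====
-- def get_variable_posistions_from_code(tokens: list, variable_names: list) -> dict:
--     '''
--     给定一串代码，以及variable的变量名，如: a
--     返回这串代码中这些变量名对应的位置.
--     '''
--     positions = {}
--     for name in variable_names:
--         for index, token in enumerate(tokens):
--             if name == token:
--                 try:
--                     positions[name].append(index)
--                 except:
--                     positions[name] = [index]
--
--     return positions
-- ===== SOURCE B (Python) =====
-- def get_variable_posistions_from_code(tokens: list, variable_names: list) -> dict: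
--     '''
--     One pass over tokens building a token -> indices map, then one lookup per
--     variable name (O(N+V) instead of A's O(V*N)).
--     '''
--     index_map = {}
--     for i, tok in enumerate(tokens):
--         index_map.setdefault(tok, []).append(i)
--     positions = {}
--     for name in variable_names:
--         if name in index_map:
--             positions.setdefault(name, []).extend(index_map[name])
--     return positions
-- ===== Notes on version B (the rewrite author's own statement) =====
-- stated objective: alternative
-- what changed: B builds a token->indices dictionary in one pass over tokens and then does one dictionary lookup per variable name, replacing A's full scan of tokens for every name.
import Mathlib
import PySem

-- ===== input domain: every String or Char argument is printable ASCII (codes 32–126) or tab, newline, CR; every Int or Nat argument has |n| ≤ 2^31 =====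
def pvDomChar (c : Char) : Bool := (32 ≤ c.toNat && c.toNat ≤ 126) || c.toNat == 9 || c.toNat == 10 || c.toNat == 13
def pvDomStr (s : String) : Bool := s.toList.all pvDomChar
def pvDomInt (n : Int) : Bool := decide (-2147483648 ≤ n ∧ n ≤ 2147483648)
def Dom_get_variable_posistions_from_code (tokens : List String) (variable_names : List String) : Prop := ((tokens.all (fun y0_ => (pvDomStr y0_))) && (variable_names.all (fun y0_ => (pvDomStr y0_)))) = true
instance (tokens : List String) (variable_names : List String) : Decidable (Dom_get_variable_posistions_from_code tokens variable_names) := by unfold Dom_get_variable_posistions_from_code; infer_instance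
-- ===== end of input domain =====

-- B replaces A's scan of all tokens for every variable name by one pass building a
-- token → indices dictionary followed by a single lookup per name.

-- ===== PORT A =====
def get_variable_posistions_from_code (tokens : List String) (variable_names : List String) : List (String × List Int) :=
  (variable_names.foldl (fun positions name =>
      (PySem.List.enumerate tokens 0).foldl (fun positions p =>
          if name == p.2 then
            match positions.get? name with
            | some l => positions.insert name (l ++ [p.1])   -- positions[name].append(index)
            | none   => positions.insert name [p.1]          -- except: positions[name] = [index]
          else positions)
        positions)
    PySem.Dict.empty).items

-- ===== PORT B =====
def get_variable_posistions_from_code_alt (tokens : List String) (variable_names : List String) : List (String × List Int) :=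
  -- index_map.setdefault(tok, []).append(i) : value becomes old ++ [i], key position unchanged = Dict.modify
  let index_map := (PySem.List.enumerate tokens 0).foldl
      (fun m p => m.modify p.2 [] (· ++ [p.1])) PySem.Dict.empty
  (variable_names.foldl (fun positions name =>
      match index_map.get? name with                         -- if name in index_map: … index_map[name]
      | some l =>
          -- positions.setdefault(name, []).extend(l): the shared list becomes old ++ l,
          -- the key's position is the one setdefault gave it (exact: overwrite keeps position)
          (positions.setdefault name []).insert name (positions.getD name [] ++ l)
      | none   => positions)
    PySem.Dict.empty).items

-- ===== PRECONDITION & SPEC =====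
def Spec_get_variable_posistions_from_code (tokens : List String) (variable_names : List String) (out : List (String × List Int)) : Prop := out = get_variable_posistions_from_code_alt tokens variable_names
instance (tokens : List String) (variable_names : List String) (out : List (String × List Int)) : Decidable (Spec_get_variable_posistions_from_code tokens variable_names out) := by unfold Spec_get_variable_posistions_from_code; infer_instance

-- ===== CLAIM (what is proved, stated in full; the proofs are below) =====
def Claim_equal_get_variable_posistions_from_code : Prop := ∀ (tokens : List String) (variable_names : List String), Dom_get_variable_posistions_from_code tokens variable_names → Spec_get_variable_posistions_from_code tokens variable_names (get_variable_posistions_from_code tokens variable_names)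

-- ===== LEMMAS AND PROOFS =====

/-- The indices (in enumeration order) of the tokens equal to `name`. -/
def pvOcc (tokens : List String) (name : String) : List Int :=
  ((PySem.List.enumerate tokens 0).filter (fun p => name == p.2)).map (·.1)

/-- A's inner `try/except` append step, written as one insert. -/
lemma pv_step_eq (d : PySem.Dict String (List Int)) (name : String) (i : Int) :
    (match d.get? name with
     | some l => d.insert name (l ++ [i])
     | none   => d.insert name [i])
    = d.insert name (d.getD name [] ++ [i]) := by
  cases h : d.get? name with
  | some l => rw [PySem.Dict.getD_of_get?_eq_some _ _ h]
  | none   => rw [PySem.Dict.getD_of_get?_eq_none _ _ h]; rfl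

/-- Folding A's append step over a nonempty index list is one big append-insert. -/
lemma pv_foldl_append (name : String) :
    ∀ (l : List Int) (d : PySem.Dict String (List Int)), l ≠ [] →
      l.foldl (fun d i =>
          match d.get? name with
          | some v => d.insert name (v ++ [i])
          | none   => d.insert name [i]) d
      = d.insert name (d.getD name [] ++ l) := by
  intro l
  induction l with
  | nil => simp
  | cons i xs ih =>
      intro d _
      simp only [List.foldl_cons]
      rw [pv_step_eq]
      rcases eq_or_ne xs [] with h | h
      · subst h; simp
      · rw [ih _ h]
        simp [PySem.Dict.getD_insert_self, PySem.Dict.insert_insert_self]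

/-- A's whole inner loop over `enumerate(tokens)` for one name. -/
lemma pv_inner_eq (tokens : List String) (name : String)
    (d : PySem.Dict String (List Int)) :
    (PySem.List.enumerate tokens 0).foldl (fun positions p =>
        if name == p.2 then
          match positions.get? name with
          | some l => positions.insert name (l ++ [p.1])
          | none   => positions.insert name [p.1]
        else positions) d
    = if pvOcc tokens name = [] then d
      else d.insert name (d.getD name [] ++ pvOcc tokens name) := by
  rw [← List.foldl_filter
        (f := fun (positions : PySem.Dict String (List Int)) (p : Int × String) =>
          match positions.get? name with
          | some l => positions.insert name (l ++ [p.1])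
          | none   => positions.insert name [p.1])
        (p := fun p => name == p.2)]
  rw [show ((PySem.List.enumerate tokens 0).filter (fun p => name == p.2)).foldl
        (fun (positions : PySem.Dict String (List Int)) (p : Int × String) =>
          match positions.get? name with
          | some l => positions.insert name (l ++ [p.1])
          | none   => positions.insert name [p.1]) d
      = (pvOcc tokens name).foldl (fun d i =>
          match d.get? name with
          | some v => d.insert name (v ++ [i])
          | none   => d.insert name [i]) d from
        (List.foldl_map (f := fun p : Int × String => p.1)
          (g := fun (d : PySem.Dict String (List Int)) (i : Int) =>
            match d.get? name with
            | some v => d.insert name (v ++ [i])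
            | none   => d.insert name [i])
          (l := (PySem.List.enumerate tokens 0).filter (fun p => name == p.2)) (init := d)).symm]
  rcases eq_or_ne (pvOcc tokens name) [] with h | h
  · simp [h]
  · rw [pv_foldl_append name _ _ h, if_neg h]

/-- B's index map: lookup of `name` yields exactly `pvOcc`, `none` when absent. -/
lemma pv_index_map_get? (tokens : List String) (name : String) :
    ((PySem.List.enumerate tokens 0).foldl
        (fun m p => m.modify p.2 [] (· ++ [p.1])) PySem.Dict.empty).get? name
    = if pvOcc tokens name = [] then none else some (pvOcc tokens name) := by
  set im : PySem.Dict String (List Int) := (PySem.List.enumerate tokens 0).foldl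
      (fun m p => m.modify p.2 [] (· ++ [p.1])) PySem.Dict.empty with him
  have hgetD : im.getD name [] = pvOcc tokens name := by
    rw [him, show (PySem.List.enumerate tokens 0).foldl
          (fun (m : PySem.Dict String (List Int)) p => m.modify p.2 [] (· ++ [p.1]))
          PySem.Dict.empty
        = ((PySem.List.enumerate tokens 0).map Prod.swap).foldl
          (fun (m : PySem.Dict String (List Int)) q => m.modify q.1 [] (· ++ [q.2]))
          PySem.Dict.empty from
        (List.foldl_map (f := Prod.swap)
          (g := fun (m : PySem.Dict String (List Int)) (q : String × Int) => m.modify q.1 [] (· ++ [q.2]))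
          (l := PySem.List.enumerate tokens 0) (init := PySem.Dict.empty)).symm,
       PySem.Dict.getD_foldl_modify_append]
    unfold pvOcc
    rw [PySem.Dict.getD_empty, List.nil_append, List.filter_map, List.map_map]
    congr 1
    apply List.filter_congr
    intro p _
    exact Bool.beq_comm
  have hcontains : im.contains name = decide (name ∈ tokens) := by
    rw [him, PySem.Dict.contains_eq_decide_mem_keys,
        PySem.Dict.keys_foldl_modify_key (key := fun p : Int × String => p.2)
          (f := fun _ p => (· ++ [p.1]))]
    simp [PySem.List.map_snd_enumerate, PySem.Set.update_nil_left, PySem.Set.mem_ofList,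
      PySem.Dict.keys_empty]
  have hocc : pvOcc tokens name = [] ↔ name ∉ tokens := by
    unfold pvOcc
    rw [List.map_eq_nil_iff, List.filter_eq_nil_iff]
    constructor
    · intro h hn
      rw [← PySem.List.map_snd_enumerate tokens 0] at hn
      obtain ⟨p, hp, hps⟩ := List.mem_map.mp hn
      exact h p hp (by simp [hps])
    · intro hn p hp hb
      apply hn
      rw [← PySem.List.map_snd_enumerate tokens 0]
      exact List.mem_map.mpr ⟨p, hp, by simpa using (beq_iff_eq.mp hb).symm⟩
  by_cases hm : name ∈ tokens
  · have h1 : pvOcc tokens name ≠ [] := fun h => (hocc.mp h) hm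
    rw [if_neg h1]
    rcases hg : im.get? name with _ | v
    · exfalso
      rw [PySem.Dict.get?_eq_none_iff_contains, hcontains] at hg
      simp [hm] at hg
    · rw [PySem.Dict.getD_of_get?_eq_some _ _ hg] at hgetD
      rw [hgetD]
  · rw [if_pos (hocc.mpr hm), PySem.Dict.get?_eq_none_iff_contains, hcontains]
    simp [hm]

/-- B's per-name update equals a plain overwrite-insert. -/
lemma pv_setdefault_insert (d : PySem.Dict String (List Int)) (name : String) (v : List Int) :
    (d.setdefault name []).insert name v = d.insert name v := by
  cases h : d.contains name
  · rw [PySem.Dict.setdefault_of_not_contains _ _ h, PySem.Dict.insert_insert_self]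
  · rw [PySem.Dict.setdefault_of_contains _ _ h]

/-- Two folds with pointwise-equal step functions agree. -/
lemma pv_foldl_ext {α β : Type} (f g : β → α → β) (h : ∀ b a, f b a = g b a)
    (l : List α) (b : β) : l.foldl f b = l.foldl g b := by
  rw [show f = g from funext fun b => funext fun a => h b a]

-- ===== VERDICT (by name: the statement is the Claim_ definition above) =====
theorem get_variable_posistions_from_code_spec : Claim_equal_get_variable_posistions_from_code := by
  intro tokens variable_names _
  unfold Spec_get_variable_posistions_from_code
  unfold get_variable_posistions_from_code get_variable_posistions_from_code_alt
  congr 1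
  apply pv_foldl_ext
  intro d name
  rw [pv_inner_eq, pv_index_map_get?]
  rcases eq_or_ne (pvOcc tokens name) [] with h | h
  · simp [h]
  · rw [if_neg h, if_neg h]
    exact (pv_setdefault_insert d name _).symm
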